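-- pv_equiv track=rewrite | github.com/Ukandu20/world-cup | world_cup_simulation.py | select_prior_editions
-- ===== SOURCE A (Python) =====
-- V2_PREVIOUS_EDITION_LOOKBACK = 5
--
-- def select_prior_editions(
--     edition_year: int,
--     edition_weight_map: dict[int, int],
--     edition_lookback: int = V2_PREVIOUS_EDITION_LOOKBACK,
-- ) -> list[int]:
--     """Return the most recent prior World Cup editions for one reference year."""
--     earlier_editions = [year for year in sorted(edition_weight_map) if year < int(edition_year)]
--     if edition_lookback > 0:
--         return earlier_editions[-int(edition_lookback) :]
--     return earlier_editions
-- ===== SOURCE B (Python) =====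
-- V2_PREVIOUS_EDITION_LOOKBACK = 5
--
--
-- def select_prior_editions(
--     edition_year,
--     edition_weight_map,
--     edition_lookback=V2_PREVIOUS_EDITION_LOOKBACK,
-- ):
--     """Return the most recent prior World Cup editions for one reference year."""
--     year_cut = int(edition_year)
--     cap = int(edition_lookback)
--     window = []
--     for year in sorted(edition_weight_map):
--         if year < year_cut:
--             window.append(year)
--             if 0 < cap < len(window):
--                 window.pop(0)
--     return window
-- ===== Notes on version B (the rewrite author's own statement) =====
-- stated objective: alternative
-- what changed: Replaces the filter-comprehension plus negative-index slice with a single streaming pass over the sorted keys that maintains a bounded sliding window (append, then pop the front when the window exceeds the lookback), so no slice and no second list are ever built.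
import Mathlib
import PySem

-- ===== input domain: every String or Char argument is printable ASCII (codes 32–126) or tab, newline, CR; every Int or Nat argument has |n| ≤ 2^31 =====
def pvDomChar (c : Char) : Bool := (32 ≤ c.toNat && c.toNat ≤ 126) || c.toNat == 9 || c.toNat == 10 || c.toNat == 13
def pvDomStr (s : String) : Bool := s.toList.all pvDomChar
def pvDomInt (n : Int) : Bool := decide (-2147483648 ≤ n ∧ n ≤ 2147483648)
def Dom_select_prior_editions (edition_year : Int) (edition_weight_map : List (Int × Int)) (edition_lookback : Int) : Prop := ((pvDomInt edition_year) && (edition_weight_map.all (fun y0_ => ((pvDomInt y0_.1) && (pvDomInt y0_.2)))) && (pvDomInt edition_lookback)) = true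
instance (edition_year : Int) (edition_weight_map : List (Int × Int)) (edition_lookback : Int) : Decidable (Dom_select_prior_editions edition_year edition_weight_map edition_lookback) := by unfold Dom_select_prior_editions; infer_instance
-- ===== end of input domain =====

-- B replaces A's filter-comprehension + negative-index slice by one streaming pass over the
-- sorted keys maintaining a bounded sliding window (alternative decomposition, same cost).

-- ===== PORT A =====
-- earlier_editions = [year for year in sorted(edition_weight_map) if year < int(edition_year)]
-- if edition_lookback > 0: return earlier_editions[-int(edition_lookback):]
-- return earlier_editions
def select_prior_editions (edition_year : Int) (edition_weight_map : List (Int × Int)) (edition_lookback : Int) : List Int :=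
  let earlier_editions :=
    (PySem.List.sorted ((PySem.Dict.ofList edition_weight_map).keys) (fun x => x) false).filter
      (fun year => decide (year < edition_year))
  if edition_lookback > 0 then
    PySem.List.slice earlier_editions (some (-edition_lookback)) none
  else
    earlier_editions

-- ===== PORT B =====
-- one pass: window.append(year); if 0 < cap < len(window): window.pop(0)
def select_prior_editions_alt (edition_year : Int) (edition_weight_map : List (Int × Int)) (edition_lookback : Int) : List Int :=
  let year_cut := edition_year
  let cap := edition_lookback
  (PySem.List.sorted ((PySem.Dict.ofList edition_weight_map).keys) (fun x => x) false).foldl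
    (fun window year =>
      if year < year_cut then
        let w' := window ++ [year]
        -- window.pop(0) on the nonempty w' is exact as w'.drop 1
        if 0 < cap ∧ cap < (w'.length : Int) then w'.drop 1 else w'
      else window) []

-- ===== PRECONDITION & SPEC =====
def Spec_select_prior_editions (edition_year : Int) (edition_weight_map : List (Int × Int)) (edition_lookback : Int) (out : List Int) : Prop := out = select_prior_editions_alt edition_year edition_weight_map edition_lookback
instance (edition_year : Int) (edition_weight_map : List (Int × Int)) (edition_lookback : Int) (out : List Int) : Decidable (Spec_select_prior_editions edition_year edition_weight_map edition_lookback out) := by unfold Spec_select_prior_editions; infer_instance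

-- ===== CLAIM (what is proved, stated in full; the proofs are below) =====
def Claim_equal_select_prior_editions : Prop := ∀ (edition_year : Int) (edition_weight_map : List (Int × Int)) (edition_lookback : Int), Dom_select_prior_editions edition_year edition_weight_map edition_lookback → Spec_select_prior_editions edition_year edition_weight_map edition_lookback (select_prior_editions edition_year edition_weight_map edition_lookback)

-- ===== LEMMAS AND PROOFS =====

-- "keep the last k" normal form shared by both sides (proof-only helper)
def pvCap (k : Int) (e : List Int) : List Int :=
  if 0 < k then e.drop (e.length - k.toNat) else e

theorem pvCap_shift (k : Int) (b : Int) (w t : List Int)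
    (hk : 0 < k) (hlt : k < ((b :: w).length : Int)) :
    pvCap k (w ++ t) = pvCap k ((b :: w) ++ t) := by
  unfold pvCap
  simp only [if_pos hk, List.cons_append, List.length_cons, List.length_append]
  have hkn : k.toNat ≤ w.length := by simp at hlt; omega
  have : w.length + t.length + 1 - k.toNat = (w.length + t.length - k.toNat) + 1 := by omega
  rw [this, List.drop_succ_cons]

theorem pv_window_loop (y k : Int) (l : List Int) :
    ∀ (w : List Int), (0 < k → (w.length : Int) ≤ k) →
      l.foldl (fun window year =>
        if year < y then
          let w' := window ++ [year]
          if 0 < k ∧ k < (w'.length : Int) then w'.drop 1 else w'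
        else window) w
      = pvCap k (w ++ l.filter (fun year => decide (year < y))) := by
  induction l with
  | nil =>
      intro w hw
      simp only [List.foldl_nil, List.filter_nil, List.append_nil, pvCap]
      split_ifs with hk
      · have : w.length - k.toNat = 0 := by have := hw hk; omega
        simp [this]
      · rfl
  | cons a l ih =>
      intro w hw
      simp only [List.foldl_cons, List.filter_cons]
      by_cases ha : a < y
      · simp only [decide_eq_true_eq, ha, if_true]
        by_cases hk : 0 < k ∧ k < ((w ++ [a]).length : Int)
        · simp only [if_pos hk]
          have hne : w ++ [a] ≠ [] := by simp
          obtain ⟨b, w', hbw⟩ := List.exists_cons_of_ne_nil hne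
          rw [hbw, List.drop_succ_cons, List.drop_zero]
          rw [ih w' (by intro h0; have hL := congrArg List.length hbw; simp at hL; have h2 := hk.2; simp at h2 ⊢; omega)]
          have := pvCap_shift k b w' (l.filter (fun year => decide (year < y))) hk.1 (hbw ▸ hk.2)
          rw [this, ← hbw]
          simp
        · simp only [if_neg hk]
          rw [ih (w ++ [a]) (by intro h0; simp at hk ⊢; have := hk h0; omega)]
          simp
      · simp only [decide_eq_true_eq, ha, if_false]
        exact ih w hw

theorem pv_slice_eq_cap (k : Int) (e : List Int) (hk : 0 < k) :
    PySem.List.slice e (some (-k)) none = pvCap k e := by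
  have hkeq : k = ((k.toNat : Nat) : Int) := by omega
  rw [PySem.List.slice_some_none, pvCap, if_pos hk, hkeq,
    PySem.List.clampIdx_neg_natCast _ _ (by omega)]
  simp
  omega

-- ===== VERDICT (by name: the statement is the Claim_ definition above) =====
theorem select_prior_editions_spec : Claim_equal_select_prior_editions := by
  intro y m k _
  unfold Spec_select_prior_editions select_prior_editions select_prior_editions_alt
  rw [pv_window_loop y k _ [] (by intro h; simp; omega)]
  simp only [List.nil_append]
  split_ifs with hk
  · exact pv_slice_eq_cap k _ hk
  · rw [pvCap, if_neg hk]
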